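-- pv_equiv track=rewrite | github.com/RuiyuM/AI-Scientist-v2 | research_reports/2026-03-29_01-53-16_confidence_gated_ttl_lora_attempt_0/0-run/process_ForkProcess-3/runfile.py | safe_best_max
-- ===== SOURCE A (Python) =====
-- def safe_best_max(sequence, default=None):
--     if sequence is None or len(sequence) == 0:
--         return default
--     values = []
--     for item in sequence:
--         if isinstance(item, (list, tuple)) and len(item) >= 2:
--             values.append(item[1])
--     return max(values) if values else default
-- ===== SOURCE B (Python) =====
-- def _merge(a, b):
--     # combine two optional maxima
--     if a is None:
--         return b
--     if b is None:
--         return a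
--     return a if a >= b else b
--
--
-- def _best_dc(items):
--     # divide and conquer: best item[1] among pair-like items, or None
--     n = len(items)
--     if n == 0:
--         return None
--     if n == 1:
--         item = items[0]
--         if isinstance(item, (list, tuple)) and len(item) >= 2:
--             return item[1]
--         return None
--     mid = n // 2
--     return _merge(_best_dc(items[:mid]), _best_dc(items[mid:]))
--
--
-- def safe_best_max(sequence, default=None):
--     if sequence is None or len(sequence) == 0:
--         return default
--     b = _best_dc(list(sequence))
--     return b if b is not None else default
-- ===== Notes on version B (the rewrite author's own statement) =====
-- stated objective: alternative
-- what changed: Replaces the linear collect-then-max pass with a recursive divide-and-conquer: split the sequence in halves, compute each half's best pair value, and merge the two optional maxima.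
import Mathlib
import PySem

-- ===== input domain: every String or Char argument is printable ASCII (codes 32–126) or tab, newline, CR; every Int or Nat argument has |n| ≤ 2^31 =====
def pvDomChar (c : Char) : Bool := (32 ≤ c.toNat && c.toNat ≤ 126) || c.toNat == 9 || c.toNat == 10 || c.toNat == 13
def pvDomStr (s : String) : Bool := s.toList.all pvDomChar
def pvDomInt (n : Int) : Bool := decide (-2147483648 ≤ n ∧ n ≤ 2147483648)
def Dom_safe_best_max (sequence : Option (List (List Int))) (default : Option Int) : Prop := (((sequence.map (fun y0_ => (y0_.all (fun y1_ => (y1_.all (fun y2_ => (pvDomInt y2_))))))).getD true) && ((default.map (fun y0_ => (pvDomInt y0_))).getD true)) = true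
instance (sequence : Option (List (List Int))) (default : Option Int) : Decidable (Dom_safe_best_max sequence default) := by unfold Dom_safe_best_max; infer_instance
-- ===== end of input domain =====

-- B replaces A's collect-then-max pass with a divide-and-conquer best (split halves, merge optional maxima); equal return value on all inputs.


-- ===== PORT A =====
-- A: collect item[1] of every pair-like item into `values`, then max(values) if nonempty else default.
def safe_best_max (sequence : Option (List (List Int))) (default : Option Int) : Option Int :=
  match sequence with
  | none => default
  | some xs =>
    if xs.length = 0 then default
    else
      let values := xs.foldl (fun acc item =>
        if 2 ≤ item.length then
          match PySem.List.pyGet? item 1 with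
          | some v => acc ++ [v]
          | none => acc
        else acc) []
      if values.isEmpty then default else PySem.List.max? values (fun y => y)

-- ===== PORT B =====
-- B helper _merge: combine two optional maxima.
def pvMerge (a b : Option Int) : Option Int :=
  match a, b with
  | none, b => b
  | some x, none => some x
  | some x, some y => if x ≥ y then some x else some y

-- B helper _best_dc: divide and conquer; items[:mid] / items[mid:] with 0 ≤ mid ≤ n are exactly take/drop.
-- fuel (= initial length, enough for the whole recursion tree) only makes the recursion structural.
def pvBestDCGo : Nat → List (List Int) → Option Int
  | 0, _ => none
  | fuel + 1, items =>
    if items.length = 0 then none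
    else if items.length = 1 then
      match items with
      | item :: _ => if 2 ≤ item.length then PySem.List.pyGet? item 1 else none
      | [] => none
    else
      let mid := items.length / 2
      pvMerge (pvBestDCGo fuel (items.take mid)) (pvBestDCGo fuel (items.drop mid))

def pvBestDC (items : List (List Int)) : Option Int :=
  pvBestDCGo items.length items

def safe_best_max_alt (sequence : Option (List (List Int))) (default : Option Int) : Option Int :=
  match sequence with
  | none => default
  | some xs =>
    if xs.length = 0 then default
    else
      match pvBestDC xs with
      | some v => some v
      | none => default

-- ===== PRECONDITION & SPEC =====
def Spec_safe_best_max (sequence : Option (List (List Int))) (default : Option Int) (out : Option Int) : Prop := out = safe_best_max_alt sequence default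
instance (sequence : Option (List (List Int))) (default : Option Int) (out : Option Int) : Decidable (Spec_safe_best_max sequence default out) := by unfold Spec_safe_best_max; infer_instance

-- ===== CLAIM =====
def Claim_equal_safe_best_max : Prop := ∀ (sequence : Option (List (List Int))) (default : Option Int), Dom_safe_best_max sequence default → Spec_safe_best_max sequence default (safe_best_max sequence default)

-- ===== LEMMAS AND PROOFS =====

def pvExtract (item : List Int) : Option Int :=
  if 2 ≤ item.length then PySem.List.pyGet? item 1 else none

def pvListMax : List Int → Option Int
  | [] => none
  | x :: t => some (t.foldl max x)

lemma afold_eq (xs : List (List Int)) (acc : List Int) :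
    xs.foldl (fun acc item =>
        if 2 ≤ item.length then
          match PySem.List.pyGet? item 1 with
          | some v => acc ++ [v]
          | none => acc
        else acc) acc = acc ++ xs.filterMap pvExtract := by
  induction xs generalizing acc with
  | nil => simp
  | cons h t ih =>
    simp only [List.foldl_cons, List.filterMap_cons, pvExtract]
    split_ifs with hl
    · cases hg : PySem.List.pyGet? h 1 <;> simp [ih, pvExtract]
    · simp [ih, pvExtract]

lemma listMax_append (L1 L2 : List Int) :
    pvListMax (L1 ++ L2) = pvMerge (pvListMax L1) (pvListMax L2) := by
  cases L1 with
  | nil =>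
    cases L2 <;> simp [pvListMax, pvMerge]
  | cons x t =>
    cases L2 with
    | nil => simp [pvListMax, pvMerge]
    | cons y s =>
      have h2 : ∀ (l : List Int) (a b : Int), l.foldl max (max a b) = max a (l.foldl max b) := by
        intro l; induction l with
        | nil => intro a b; rfl
        | cons c cs ih => intro a b; simp only [List.foldl_cons, max_assoc, ih]
      simp only [pvListMax, List.cons_append, List.foldl_append, pvMerge, List.foldl_cons, h2]
      split_ifs with h
      · exact congrArg some (max_eq_left h)
      · exact congrArg some (max_eq_right (le_of_not_ge h))

lemma bestDCGo_eq (fuel : Nat) (items : List (List Int)) (hf : items.length ≤ fuel) :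
    pvBestDCGo fuel items = pvListMax (items.filterMap pvExtract) := by
  induction fuel generalizing items with
  | zero =>
    have : items = [] := List.length_eq_zero_iff.mp (Nat.le_zero.mp hf)
    subst this
    simp [pvBestDCGo, pvListMax]
  | succ fuel ih =>
    simp only [pvBestDCGo]
    by_cases h0 : items.length = 0
    · have : items = [] := List.length_eq_zero_iff.mp h0
      subst this
      simp [pvListMax]
    · rw [if_neg h0]
      by_cases h1 : items.length = 1
      · rw [if_pos h1]
        match items, h1 with
        | [item], _ =>
          simp only [List.filterMap_cons, List.filterMap_nil, pvExtract]
          split_ifs with hl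
          · cases hg : PySem.List.pyGet? item 1 <;> simp [pvListMax]
          · simp [pvListMax]
      · rw [if_neg h1]
        have ht : (items.take (items.length / 2)).length ≤ fuel := by
          simp only [List.length_take]; omega
        have hd : (items.drop (items.length / 2)).length ≤ fuel := by
          simp only [List.length_drop]; omega
        rw [ih _ ht, ih _ hd, ← listMax_append, ← List.filterMap_append,
          List.take_append_drop]

lemma bestDC_eq (items : List (List Int)) :
    pvBestDC items = pvListMax (items.filterMap pvExtract) :=
  bestDCGo_eq items.length items le_rfl

-- ===== VERDICT =====
theorem safe_best_max_spec : Claim_equal_safe_best_max := by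
  intro sequence default _
  unfold Spec_safe_best_max safe_best_max safe_best_max_alt
  cases sequence with
  | none => rfl
  | some xs =>
    simp only [afold_eq, List.nil_append, bestDC_eq]
    by_cases h : xs.length = 0
    · simp [h]
    · simp only [if_neg h]
      cases hL : xs.filterMap pvExtract with
      | nil => simp [pvListMax]
      | cons x t => simp [pvListMax, PySem.List.max?_id_cons]
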